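-- pv_equiv track=rewrite | github.com/AshtonVaughan/ProjectTriage | tools/oauth.py | _http_status
-- ===== SOURCE A (Python) =====
-- def _http_status(output: str) -> str:
--     """Extract the first HTTP status code from curl -i output."""
--     for line in output.splitlines():
--         stripped = line.strip()
--         if stripped.upper().startswith("HTTP/"):
--             parts = stripped.split()
--             if len(parts) >= 2:
--                 return parts[1]
--     return "unknown"
-- ===== SOURCE B (Python) =====
-- def _http_status(output: str) -> str:
--     """Extract the first HTTP status code from curl -i output.
--
--     Single character-level scan: no splitlines/strip/split intermediate lists.
--     """
--     i, n = 0, len(output)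
--     while i < n:
--         # skip leading spaces/tabs of the current line
--         j = i
--         while j < n and output[j] in " \t":
--             j += 1
--         if output[j:j + 5].upper() == "HTTP/":
--             # skip the first token
--             k = j
--             while k < n and output[k] not in " \t\r\n":
--                 k += 1
--             # skip the whitespace between the tokens
--             while k < n and output[k] in " \t":
--                 k += 1
--             # collect the second token
--             t = k
--             while t < n and output[t] not in " \t\r\n":
--                 t += 1
--             if t > k:
--                 return output[k:t]
--         # advance to the start of the next line
--         while i < n and output[i] not in "\r\n":
--             i += 1
--         if i < n:
--             i += 2 if output[i] == "\r" and i + 1 < n and output[i + 1] == "\n" else 1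
--     return "unknown"
-- ===== Notes on version B (the rewrite author's own statement) =====
-- stated objective: alternative
-- what changed: A builds intermediate lists via splitlines/strip/split per line; B is a single index-based character scan over the raw string that skips whitespace, matches the HTTP/ prefix case-insensitively and slices the second token out directly, allocating no per-line lists.
import Mathlib
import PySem

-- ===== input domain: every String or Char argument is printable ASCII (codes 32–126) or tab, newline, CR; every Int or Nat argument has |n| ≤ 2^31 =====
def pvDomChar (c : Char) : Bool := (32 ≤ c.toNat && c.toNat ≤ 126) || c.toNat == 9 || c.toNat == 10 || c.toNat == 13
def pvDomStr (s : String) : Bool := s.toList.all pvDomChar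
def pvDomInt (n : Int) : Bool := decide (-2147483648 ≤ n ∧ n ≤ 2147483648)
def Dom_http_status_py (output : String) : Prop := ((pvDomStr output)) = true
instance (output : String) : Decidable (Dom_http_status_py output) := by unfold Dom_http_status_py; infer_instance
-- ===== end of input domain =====

-- B is a single left-to-right character scan (no splitlines/strip/split intermediate
-- lists); equivalence with A's line-by-line pipeline is proved on the stated domain.

-- ===== PORT A =====
-- literal port of A: for line in output.splitlines(): strip, upper().startswith("HTTP/"), split, parts[1]
def httpStatusLoop : List (List Char) → List Char
  | [] => ['u','n','k','n','o','w','n']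
  | line :: rest =>
    let stripped := PySem.Chars.strip line
    if PySem.Chars.startswith (PySem.Chars.upper stripped) ['H','T','T','P','/'] then
      let parts := PySem.Chars.split₀ stripped
      if 2 ≤ parts.length then PySem.List.pyGetD parts 1 []
      else httpStatusLoop rest
    else httpStatusLoop rest

def http_status_py (output : String) : String :=
  String.ofList (httpStatusLoop (PySem.Chars.splitlines output.toList))

-- ===== PORT B =====
def bIsST (c : Char) : Bool := c == ' ' || c == '\t'        -- output[j] in " \t"
def bIsBr (c : Char) : Bool := c == '\r' || c == '\n'       -- output[i] in "\r\n"
def bIsSep (c : Char) : Bool := bIsST c || bIsBr c          -- output[k] in " \t\r\n"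

-- advance past the line-break pair/char ("i += 2 if ... else 1")
def bChopBreak : List Char → List Char
  | '\r' :: '\n' :: r => r
  | _ :: r => r
  | [] => []

-- "while i < n and output[i] not in '\r\n': i += 1" then the break skip
def bNextLine (s : List Char) : List Char := bChopBreak (s.dropWhile (fun c => !bIsBr c))

lemma bChopBreak_le (t : List Char) : t ≠ [] → (bChopBreak t).length < t.length := by
  unfold bChopBreak
  split <;> simp

lemma bNextLine_lt (c : Char) (rest : List Char) :
    (bNextLine (c :: rest)).length < (c :: rest).length := by
  unfold bNextLine
  have h := List.length_dropWhile_le (fun c => !bIsBr c) (c :: rest)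
  rcases hd : List.dropWhile (fun c => !bIsBr c) (c :: rest) with _ | ⟨a, r⟩
  · simp [bChopBreak]
  · rw [hd] at h
    have h2 := bChopBreak_le (a :: r) (by simp)
    simp at h h2 ⊢
    omega

-- literal port of B's while-loop scan over the characters
def bScan : List Char → List Char
  | [] => ['u','n','k','n','o','w','n']
  | c :: rest =>
    let ws := (c :: rest).dropWhile bIsST                                     -- skip leading " \t"
    if (ws.take 5).map PySem.Chars.upperChar = ['H','T','T','P','/'] then     -- output[j:j+5].upper() == "HTTP/"
      let tok := (((ws.dropWhile (fun x => !bIsSep x)).dropWhile bIsST).takeWhile (fun x => !bIsSep x))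
      if tok.isEmpty then bScan (bNextLine (c :: rest)) else tok              -- "if t > k: return output[k:t]"
    else bScan (bNextLine (c :: rest))
  termination_by s => s.length
  decreasing_by all_goals exact bNextLine_lt c rest

def http_status_py_alt (output : String) : String :=
  String.ofList (bScan output.toList)

-- ===== PRECONDITION & SPEC =====
def Spec_http_status_py (output : String) (out : String) : Prop := out = http_status_py_alt output
instance (output : String) (out : String) : Decidable (Spec_http_status_py output out) := by unfold Spec_http_status_py; infer_instance

-- ===== CLAIM (what is proved, stated in full; the proofs are below) =====
def Claim_equal_http_status_py : Prop := ∀ (output : String), Dom_http_status_py output → Spec_http_status_py output (http_status_py output)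

-- ===== LEMMAS AND PROOFS =====
lemma char_eq_iff_toNat (c d : Char) : c = d ↔ c.toNat = d.toNat := by
  constructor
  · intro h; rw [h]
  · intro h
    have h2 : c.val.toNat = d.val.toNat := h
    exact Char.ext (UInt32.toNat_inj.mp h2)

lemma dom_cases (c : Char) (h : pvDomChar c = true) :
    ((32 ≤ c.toNat ∧ c.toNat ≤ 126 ∨ c.toNat = 9) ∨ c.toNat = 10) ∨ c.toNat = 13 := by
  simpa [pvDomChar, Bool.or_eq_true, decide_eq_true_eq] using h

lemma isspace_dom (c : Char) (h : pvDomChar c = true) :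
    PySem.Chars.isspace c = (bIsST c || bIsBr c) := by
  have hd := dom_cases c h
  rw [Bool.eq_iff_iff]
  simp only [PySem.Chars.isspace, bIsST, bIsBr, Bool.or_eq_true, Bool.and_eq_true,
    decide_eq_true_eq, beq_iff_eq, char_eq_iff_toNat]
  have e1 : (' ' : Char).toNat = 32 := rfl
  have e2 : ('\t' : Char).toNat = 9 := rfl
  have e3 : ('\r' : Char).toNat = 13 := rfl
  have e4 : ('\n' : Char).toNat = 10 := rfl
  rw [e1, e2, e3, e4]
  omega

lemma isspace_of_notBr (c : Char) (h : pvDomChar c = true) (hb : bIsBr c = false) :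
    PySem.Chars.isspace c = bIsST c := by
  rw [isspace_dom c h, hb, Bool.or_false]

lemma sep_eq_isspace (c : Char) (h : pvDomChar c = true) (hb : bIsBr c = false) :
    bIsSep c = PySem.Chars.isspace c := by
  rw [isspace_dom c h, bIsSep, hb]

lemma br_not_st (c : Char) (h : bIsBr c = true) : bIsST c = false := by
  rcases Bool.or_eq_true _ _ |>.mp h with h1 | h1 <;>
    · rw [beq_iff_eq] at h1; subst h1; decide

lemma br_not_sep_false (c : Char) (h : bIsBr c = true) : (!bIsSep c) = false := by
  simp [bIsSep, h]

lemma br_upper_self (c : Char) (h : bIsBr c = true) : PySem.Chars.upperChar c = c := by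
  rcases Bool.or_eq_true _ _ |>.mp h with h1 | h1 <;>
    · rw [beq_iff_eq] at h1; subst h1; decide

lemma br_not_mem_http (c : Char) (h : bIsBr c = true) :
    c ∉ (['H','T','T','P','/'] : List Char) := by
  rcases Bool.or_eq_true _ _ |>.mp h with h1 | h1 <;>
    · rw [beq_iff_eq] at h1; subst h1; decide

lemma st_upper_self (c : Char) (h : bIsST c = true) : PySem.Chars.upperChar c = c := by
  rcases Bool.or_eq_true _ _ |>.mp h with h1 | h1 <;>
    · rw [beq_iff_eq] at h1; subst h1; decide

lemma st_not_mem_http (c : Char) (h : bIsST c = true) :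
    c ∉ (['H','T','T','P','/'] : List Char) := by
  rcases Bool.or_eq_true _ _ |>.mp h with h1 | h1 <;>
    · rw [beq_iff_eq] at h1; subst h1; decide

def pvNotBr (c : Char) : Bool := !bIsBr c
def pvNotSp (c : Char) : Bool := !PySem.Chars.isspace c

lemma takeWhile_congr' {p q : Char → Bool} :
    ∀ (l : List Char), (∀ c ∈ l, p c = q c) → l.takeWhile p = l.takeWhile q := by
  intro l
  induction l with
  | nil => intro; rfl
  | cons a l ih =>
    intro h
    have ha := h a (by simp)
    by_cases hp : p a
    · rw [List.takeWhile_cons, List.takeWhile_cons, hp, ← ha, hp, ih (fun c hc => h c (by simp [hc]))]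
    · simp at hp
      rw [List.takeWhile_cons, List.takeWhile_cons, hp, ← ha, hp]
      simp

lemma dropWhile_congr' {p q : Char → Bool} :
    ∀ (l : List Char), (∀ c ∈ l, p c = q c) → l.dropWhile p = l.dropWhile q := by
  intro l
  induction l with
  | nil => intro; rfl
  | cons a l ih =>
    intro h
    have ha := h a (by simp)
    by_cases hp : p a
    · rw [List.dropWhile_cons, List.dropWhile_cons, hp, ← ha, hp, ih (fun c hc => h c (by simp [hc]))]
    · simp at hp
      rw [List.dropWhile_cons, List.dropWhile_cons, hp, ← ha, hp]
      simp

lemma dropWhile_append_stop (p : Char → Bool) (u v : List Char)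
    (hv : ∀ c, v.head? = some c → p c = false) :
    (u ++ v).dropWhile p = u.dropWhile p ++ v := by
  induction u with
  | nil =>
    cases v with
    | nil => simp
    | cons b r => simp [List.dropWhile_cons, hv b rfl]
  | cons a u ih =>
    by_cases h : p a <;> simp [List.dropWhile_cons, h, ih]

lemma takeWhile_append_stop (p : Char → Bool) (u v : List Char)
    (hv : ∀ c, v.head? = some c → p c = false) :
    (u ++ v).takeWhile p = u.takeWhile p := by
  induction u with
  | nil =>
    cases v with
    | nil => simp
    | cons b r => simp [List.takeWhile_cons, hv b rfl]
  | cons a u ih =>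
    by_cases h : p a <;> simp [List.takeWhile_cons, h, ih]

def linesSpec : List Char → List (List Char)
  | [] => []
  | c :: rest => ((c :: rest).takeWhile pvNotBr) :: linesSpec (bNextLine (c :: rest))
  termination_by s => s.length
  decreasing_by exact bNextLine_lt c rest

lemma linesSpec_cons (c : Char) (rest : List Char) :
    linesSpec (c :: rest) = ((c :: rest).takeWhile pvNotBr) :: linesSpec (bNextLine (c :: rest)) := by
  rw [linesSpec]

lemma words_dec (z : List Char) (hz : z.dropWhile PySem.Chars.isspace ≠ []) :
    ((z.dropWhile PySem.Chars.isspace).dropWhile pvNotSp).length < z.length := by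
  cases hd : z.dropWhile PySem.Chars.isspace with
  | nil => exact absurd hd hz
  | cons a u =>
    have ha : PySem.Chars.isspace a = false := by
      have h0 := List.head_dropWhile_not PySem.Chars.isspace (l := z) (by rw [hd]; simp)
      simpa [hd] using h0
    have h1 := List.length_dropWhile_le PySem.Chars.isspace z
    rw [hd] at h1
    have h2 := List.length_dropWhile_le pvNotSp u
    rw [List.dropWhile_cons]
    simp only [pvNotSp, ha, Bool.not_false, if_true]
    simp at h1
    omega

def words (z : List Char) : List (List Char) :=
  if hz : z.dropWhile PySem.Chars.isspace = [] then []
  else ((z.dropWhile PySem.Chars.isspace).takeWhile pvNotSp)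
       :: words ((z.dropWhile PySem.Chars.isspace).dropWhile pvNotSp)
  termination_by z.length
  decreasing_by exact words_dec z hz
lemma words_unfold (z : List Char) :
    words z = if z.dropWhile PySem.Chars.isspace = [] then []
      else ((z.dropWhile PySem.Chars.isspace).takeWhile pvNotSp)
           :: words ((z.dropWhile PySem.Chars.isspace).dropWhile pvNotSp) := by
  rw [words]
  split <;> rfl

lemma words_cons_space (c : Char) (rest : List Char) (h : PySem.Chars.isspace c = true) :
    words (c :: rest) = words rest := by
  rw [words_unfold (c :: rest), words_unfold rest, List.dropWhile_cons, h]
  simp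

lemma bChopBreak_cons (c : Char) (rest : List Char)
    (h : ∀ r, c = '\r' → rest = '\n' :: r → False) : bChopBreak (c :: rest) = rest := by
  unfold bChopBreak
  split
  · rename_i heq
    injection heq with h1 h2
    exact (h _ h1 h2).elim
  · rename_i heq
    injection heq with h1 h2
    rw [h2]
  · simp_all

lemma splitlines_go_spec (isB : Char → Bool) (hB : ∀ c, pvDomChar c = true → isB c = bIsBr c)
    (s cur : List Char) (acc : List (List Char)) :
    (∀ c ∈ s, pvDomChar c = true) →
    PySem.Chars.splitlines.go isB s cur acc =
      acc.reverse ++ (if cur.isEmpty then linesSpec s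
        else (cur.reverse ++ s.takeWhile pvNotBr) :: linesSpec (bNextLine s)) := by
  induction s, cur, acc using PySem.Chars.splitlines.go.induct (isB := isB) with
  | case1 cur acc hcur =>
    intro _
    rw [PySem.Chars.splitlines.go]
    simp [hcur, linesSpec]
  | case2 cur acc hcur =>
    intro _
    rw [PySem.Chars.splitlines.go]
    simp only [Bool.not_eq_true] at hcur
    simp [hcur, linesSpec, bNextLine, bChopBreak]
  | case3 rest cur acc ih =>
    intro hdom
    rw [PySem.Chars.splitlines.go, ih (fun c hc => hdom c (by simp [hc]))]
    have hnext : bNextLine ('\r' :: '\n' :: rest) = rest := by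
      simp [bNextLine, List.dropWhile_cons, bIsBr, bChopBreak]
    have htake : ('\r' :: '\n' :: rest).takeWhile pvNotBr = [] := by
      simp [List.takeWhile_cons, pvNotBr, bIsBr]
    rw [linesSpec_cons, hnext, htake]
    cases cur <;> simp
  | case4 c rest cur acc hpat hisB ih =>
    intro hdom
    have hdc : pvDomChar c = true := hdom c (by simp)
    have hbr : bIsBr c = true := by rw [← hB c hdc]; exact hisB
    rw [PySem.Chars.splitlines.go]
    · rw [hisB]
      have hnext : bNextLine (c :: rest) = rest := by
        have hdw : List.dropWhile (fun x => !bIsBr x) (c :: rest) = c :: rest := by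
          simp [List.dropWhile_cons, hbr]
        rw [bNextLine, hdw, bChopBreak_cons c rest hpat]
      have htake : (c :: rest).takeWhile pvNotBr = [] := by
        simp [List.takeWhile_cons, pvNotBr, hbr]
      rw [ih (fun d hd => hdom d (by simp [hd])), linesSpec_cons, hnext, htake]
      cases cur <;> simp
    · exact hpat
  | case5 c rest cur acc hpat hisB ih =>
    intro hdom
    have hdc : pvDomChar c = true := hdom c (by simp)
    have hbr : bIsBr c = false := by
      rw [← hB c hdc]; simpa using hisB
    rw [PySem.Chars.splitlines.go]
    · rw [ih (fun d hd => hdom d (by simp [hd]))]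
      have hnb : pvNotBr c = true := by simp [pvNotBr, hbr]
      have hnext : bNextLine (c :: rest) = bNextLine rest := by
        rw [bNextLine, bNextLine, List.dropWhile_cons]
        simp [hbr]
      have htake : (c :: rest).takeWhile pvNotBr = c :: rest.takeWhile pvNotBr := by
        rw [List.takeWhile_cons, hnb]
        simp
      simp only [Bool.not_eq_true] at hisB
      rw [hisB]
      simp only [Bool.false_eq_true, if_false]
      rw [linesSpec_cons, hnext, htake]
      cases cur <;> simp
    · exact hpat
lemma splitlines_eq (s : List Char) (hdom : ∀ c ∈ s, pvDomChar c = true) :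
    PySem.Chars.splitlines s = linesSpec s := by
  rw [PySem.Chars.splitlines]
  rw [splitlines_go_spec _ ?_ s [] [] hdom]
  · simp
  · intro c hc
    have hd := dom_cases c hc
    rw [Bool.eq_iff_iff]
    simp only [bIsBr, Bool.or_eq_true, decide_eq_true_eq, beq_iff_eq, char_eq_iff_toNat]
    have e3 : ('\r' : Char).toNat = 13 := rfl
    have e4 : ('\n' : Char).toNat = 10 := rfl
    rw [e3, e4]
    omega

lemma words_nil : words [] = [] := by
  rw [words_unfold]; simp

lemma words_cons_notspace (c : Char) (rest : List Char) (h : PySem.Chars.isspace c = false) :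
    words (c :: rest) = (c :: rest.takeWhile pvNotSp) :: words (rest.dropWhile pvNotSp) := by
  rw [words_unfold]
  simp [List.dropWhile_cons, h, List.takeWhile_cons, pvNotSp]

lemma split0_go_spec (z cur : List Char) (acc : List (List Char)) :
    PySem.Chars.split₀.go z cur acc =
      acc.reverse ++ (if cur.isEmpty then words z
        else (cur.reverse ++ z.takeWhile pvNotSp) :: words (z.dropWhile pvNotSp)) := by
  induction z, cur, acc using PySem.Chars.split₀.go.induct with
  | case1 cur acc hcur =>
    rw [PySem.Chars.split₀.go]
    simp [hcur, words_nil]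
  | case2 cur acc hcur =>
    rw [PySem.Chars.split₀.go]
    simp only [Bool.not_eq_true] at hcur
    simp [hcur, words_nil]
  | case3 c rest cur acc hsp hcur ih =>
    rw [PySem.Chars.split₀.go, hsp]
    simp only [if_true]
    rw [ih]
    simp [hcur, words_cons_space c rest hsp]
  | case4 c rest cur acc hsp hcur ih =>
    rw [PySem.Chars.split₀.go, hsp]
    simp only [if_true]
    rw [ih]
    simp only [Bool.not_eq_true] at hcur
    have h1 : pvNotSp c = false := by simp [pvNotSp, hsp]
    simp [hcur, List.takeWhile_cons, List.dropWhile_cons, h1, words_cons_space c rest hsp]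
  | case5 c rest cur acc hsp ih =>
    rw [PySem.Chars.split₀.go]
    simp only [Bool.not_eq_true] at hsp
    rw [hsp]
    simp only [Bool.false_eq_true, if_false]
    rw [ih]
    have h1 : pvNotSp c = true := by simp [pvNotSp, hsp]
    rw [words_cons_notspace c rest hsp]
    cases cur <;> simp [List.takeWhile_cons, List.dropWhile_cons, h1]


lemma split0_eq_words (z : List Char) : PySem.Chars.split₀ z = words z := by
  rw [PySem.Chars.split₀, split0_go_spec]
  simp
lemma words_append_ws : ∀ (n : Nat) (u w : List Char), u.length ≤ n →
    (∀ c ∈ w, PySem.Chars.isspace c = true) → words (u ++ w) = words u := by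
  intro n
  induction n with
  | zero =>
    intro u w hu hw
    have : u = [] := List.eq_nil_of_length_eq_zero (Nat.le_zero.mp hu)
    subst this
    have hdw : w.dropWhile PySem.Chars.isspace = [] := by
      rw [List.dropWhile_eq_nil_iff]
      intro x hx
      exact hw x hx
    rw [List.nil_append, words_unfold w, if_pos hdw, words_nil]
  | succ n ih =>
    intro u w hu hw
    cases hw0 : w with
    | nil => simp
    | cons d w' =>
      rw [← hw0]
      have hd : PySem.Chars.isspace d = true := hw d (by simp [hw0])
      have hstop : ∀ c, w.head? = some c → pvNotSp c = false := by
        intro c hc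
        rw [hw0] at hc
        injection hc with hc
        subst hc
        simp [pvNotSp, hd]
      cases hu' : u.dropWhile PySem.Chars.isspace with
      | nil =>
        have hdw : (u ++ w).dropWhile PySem.Chars.isspace = [] := by
          rw [List.dropWhile_eq_nil_iff]
          intro x hx
          rcases List.mem_append.mp hx with h | h
          · exact List.dropWhile_eq_nil_iff.mp hu' x h
          · exact hw x h
        rw [words_unfold (u ++ w), if_pos hdw, words_unfold u, if_pos hu']
      | cons a u1 =>
        have ha : PySem.Chars.isspace a = false := by
          have h0 := List.head_dropWhile_not PySem.Chars.isspace (l := u) (by rw [hu']; simp)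
          simpa [hu'] using h0
        have hdwa : (u ++ w).dropWhile PySem.Chars.isspace = (a :: u1) ++ w := by
          rw [List.dropWhile_append, hu']
          simp
        have hne : ¬ ((u ++ w).dropWhile PySem.Chars.isspace = []) := by simp [hdwa]
        have hne2 : ¬ (u.dropWhile PySem.Chars.isspace = []) := by simp [hu']
        rw [words_unfold (u ++ w), if_neg hne, words_unfold u, if_neg hne2, hdwa, hu']
        rw [takeWhile_append_stop _ _ _ hstop, dropWhile_append_stop _ _ _ hstop]
        have hlen : ((a :: u1).dropWhile pvNotSp).length ≤ n := by
          have h1 : (a :: u1).length ≤ u.length := by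
            rw [← hu']
            exact List.length_dropWhile_le _ _
          have h2 : (a :: u1).dropWhile pvNotSp = u1.dropWhile pvNotSp := by
            rw [List.dropWhile_cons]
            simp [pvNotSp, ha]
          rw [h2]
          have h3 := List.length_dropWhile_le pvNotSp u1
          simp at h1
          omega
        rw [ih _ w hlen hw]
lemma rstrip_decomp (y : List Char) :
    ∃ w, y = PySem.Chars.rstrip y ++ w ∧ ∀ c ∈ w, PySem.Chars.isspace c = true := by
  refine ⟨(y.reverse.takeWhile PySem.Chars.isspace).reverse, ?_, ?_⟩
  · have h : (List.takeWhile PySem.Chars.isspace y.reverse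
        ++ List.dropWhile PySem.Chars.isspace y.reverse).reverse = y := by
      rw [List.takeWhile_append_dropWhile, List.reverse_reverse]
    rw [List.reverse_append] at h
    rw [PySem.Chars.rstrip]
    exact h.symm
  · intro c hc
    rw [List.mem_reverse] at hc
    exact List.mem_takeWhile_imp hc

lemma prefix5_iff (y : List Char) (hchars : ∀ c ∈ y, pvDomChar c = true ∧ bIsBr c = false) :
    (['H','T','T','P','/'] <+: (PySem.Chars.rstrip y).map PySem.Chars.upperChar)
      ↔ (y.take 5).map PySem.Chars.upperChar = ['H','T','T','P','/'] := by
  obtain ⟨w, hyw, hwsp⟩ := rstrip_decomp y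
  set x := PySem.Chars.rstrip y with hx
  constructor
  · rintro ⟨t, ht⟩
    have h0 := congrArg List.length ht
    simp at h0
    have hl5 : 5 ≤ x.length := by omega
    have hy5 : y.take 5 = x.take 5 := by
      rw [hyw, List.take_append, Nat.sub_eq_zero_of_le hl5]
      simp
    rw [hy5, List.map_take, ← ht, List.take_append]
    simp
  · intro h5
    have hy5len : 5 ≤ y.length := by
      have h0 := congrArg List.length h5
      simp [List.length_take] at h0
      omega
    by_cases hxl : 5 ≤ x.length
    · have hy5 : y.take 5 = x.take 5 := by
        rw [hyw, List.take_append, Nat.sub_eq_zero_of_le hxl]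
        simp
      have h1 : (x.map PySem.Chars.upperChar).take 5 = ['H','T','T','P','/'] := by
        rw [← List.map_take, ← hy5, h5]
      rw [← h1]
      exact List.take_prefix 5 _
    · exfalso
      push_neg at hxl
      have hxtake : x.take 5 = x := List.take_of_length_le (by omega)
      have hy5 : y.take 5 = x ++ w.take (5 - x.length) := by
        rw [hyw, List.take_append, hxtake]
      have hylen' : y.length = x.length + w.length := by rw [hyw]; simp
      have hwlen : 1 ≤ (w.take (5 - x.length)).length := by
        rw [List.length_take]
        omega
      obtain ⟨d, hd⟩ : ∃ d, d ∈ w.take (5 - x.length) := by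
        cases hq : w.take (5 - x.length) with
        | nil => rw [hq] at hwlen; simp at hwlen
        | cons a b => exact ⟨a, by simp [hq]⟩
      have hdw : d ∈ w := List.mem_of_mem_take hd
      have hdy : d ∈ y := by rw [hyw]; exact List.mem_append.mpr (Or.inr hdw)
      have hdsp : PySem.Chars.isspace d = true := hwsp d hdw
      have hdst : bIsST d = true := by
        rw [isspace_of_notBr d (hchars d hdy).1 (hchars d hdy).2] at hdsp
        exact hdsp
      have hdmem : PySem.Chars.upperChar d ∈ (['H','T','T','P','/'] : List Char) := by
        rw [← h5, hy5]
        exact List.mem_map_of_mem (List.mem_append.mpr (Or.inr hd))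
      rw [st_upper_self d hdst] at hdmem
      exact st_not_mem_http d hdst hdmem

lemma take5_append_iff (y R0 : List Char) (hR0 : ∀ c, R0.head? = some c → bIsBr c = true) :
    ((y ++ R0).take 5).map PySem.Chars.upperChar = ['H','T','T','P','/']
      ↔ (y.take 5).map PySem.Chars.upperChar = ['H','T','T','P','/'] := by
  cases hr : R0 with
  | nil => simp
  | cons b r =>
    have hb : bIsBr b = true := hR0 b (by rw [hr]; rfl)
    by_cases hyl : 5 ≤ y.length
    · rw [List.take_append, Nat.sub_eq_zero_of_le hyl]
      simp
    · push_neg at hyl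
      constructor
      · intro h
        exfalso
        have hytake : y.take 5 = y := List.take_of_length_le (by omega)
        have h2 : (y ++ b :: r).take 5 = y ++ (b :: r).take (5 - y.length) := by
          rw [List.take_append, hytake]
        have h3 : 5 - y.length = (5 - y.length - 1) + 1 := by omega
        have h4 : (b :: r).take (5 - y.length) = b :: r.take (5 - y.length - 1) := by
          rw [h3, List.take_succ_cons]
          simp
        have hbm : PySem.Chars.upperChar b ∈ (['H','T','T','P','/'] : List Char) := by
          rw [← h]
          refine List.mem_map_of_mem ?_
          rw [h2, h4]
          exact List.mem_append.mpr (Or.inr (by simp))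
        rw [br_upper_self b hb] at hbm
        exact br_not_mem_http b hb hbm
      · intro h
        exfalso
        have h0 := congrArg List.length h
        simp [List.length_take] at h0
        omega
lemma bChopBreak_suffix (t : List Char) : bChopBreak t <:+ t := by
  unfold bChopBreak
  split
  · exact (List.suffix_cons _ _).trans (List.suffix_cons _ _)
  · exact List.suffix_cons _ _
  · simp

lemma bNextLine_suffix (s : List Char) : bNextLine s <:+ s :=
  (bChopBreak_suffix _).trans (List.dropWhile_suffix _)

lemma linesSpec_nil : linesSpec [] = [] := by rw [linesSpec]

lemma bScan_nil : bScan [] = ['u','n','k','n','o','w','n'] := by rw [bScan]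

lemma words_eq_token (y : List Char) (hy : y ≠ []) (hsp : PySem.Chars.isspace (y.head hy) = false) :
    words y = (y.takeWhile pvNotSp) :: words (y.dropWhile pvNotSp) := by
  cases y with
  | nil => simp at hy
  | cons e y1 =>
    simp only [List.head_cons] at hsp
    have hns : pvNotSp e = true := by simp [pvNotSp, hsp]
    rw [words_cons_notspace e y1 hsp, List.takeWhile_cons, List.dropWhile_cons, hns]
    simp

lemma takeWhile_notSp_dropWhile_ne (l : List Char) (h : l.dropWhile PySem.Chars.isspace ≠ []) :
    (l.dropWhile PySem.Chars.isspace).takeWhile pvNotSp ≠ [] := by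
  induction l with
  | nil => simp at h
  | cons a l ih =>
    rw [List.dropWhile_cons]
    by_cases hs : PySem.Chars.isspace a = true
    · rw [List.dropWhile_cons, if_pos hs] at h
      simp only [hs, if_true]
      exact ih h
    · simp only [Bool.not_eq_true] at hs
      simp [List.takeWhile_cons, pvNotSp, hs]

lemma pyGetD_one_cons (a b : List Char) (l : List (List Char)) :
    PySem.List.pyGetD (a :: b :: l) 1 [] = b := by
  simp [pysem]

lemma core : ∀ (n : Nat) (s : List Char), s.length ≤ n → (∀ c ∈ s, pvDomChar c = true) →
    httpStatusLoop (linesSpec s) = bScan s := by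
  intro n
  induction n with
  | zero =>
    intro s hl _
    have hs : s = [] := List.eq_nil_of_length_eq_zero (Nat.le_zero.mp hl)
    subst hs
    rw [linesSpec_nil, bScan_nil]
    rfl
  | succ n ih =>
    intro s hl hdom
    cases s with
    | nil =>
      rw [linesSpec_nil, bScan_nil]
      rfl
    | cons c0 r0 =>
      have hrec : httpStatusLoop (linesSpec (bNextLine (c0 :: r0))) = bScan (bNextLine (c0 :: r0)) := by
        apply ih
        · have hlt := bNextLine_lt c0 r0
          simp only [List.length_cons] at hl hlt ⊢
          omega
        · intro c hc
          exact hdom c ((bNextLine_suffix _).subset hc)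
      -- notation
      have hdomL : ∀ c ∈ (c0 :: r0).takeWhile pvNotBr, pvDomChar c = true :=
        fun c hc => hdom c ((List.takeWhile_sublist _).subset hc)
      have hLnb : ∀ c ∈ (c0 :: r0).takeWhile pvNotBr, bIsBr c = false := by
        intro c hc
        have h0 := List.mem_takeWhile_imp hc
        simpa [pvNotBr] using h0
      have hR0 : ∀ c, ((c0 :: r0).dropWhile pvNotBr).head? = some c → bIsBr c = true := by
        intro c hc
        have hne : (c0 :: r0).dropWhile pvNotBr ≠ [] := by
          intro h
          rw [h] at hc
          cases hc
        have h0 := List.head_dropWhile_not pvNotBr hne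
        have hh := List.head?_eq_head hne
        rw [hh] at hc
        injection hc with hc
        rw [hc] at h0
        simpa [pvNotBr] using h0
      have hsplit : (c0 :: r0).takeWhile pvNotBr ++ (c0 :: r0).dropWhile pvNotBr = c0 :: r0 :=
        List.takeWhile_append_dropWhile
      have hyL : ∀ c ∈ ((c0 :: r0).takeWhile pvNotBr).dropWhile bIsST,
          c ∈ (c0 :: r0).takeWhile pvNotBr :=
        fun c hc => (List.dropWhile_sublist _).subset hc
      have hws : (c0 :: r0).dropWhile bIsST
          = ((c0 :: r0).takeWhile pvNotBr).dropWhile bIsST ++ (c0 :: r0).dropWhile pvNotBr := by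
        conv_lhs => rw [← hsplit]
        exact dropWhile_append_stop _ _ _ (fun c hc => br_not_st c (hR0 c hc))
      have hlst : PySem.Chars.lstrip ((c0 :: r0).takeWhile pvNotBr)
          = ((c0 :: r0).takeWhile pvNotBr).dropWhile bIsST :=
        dropWhile_congr' _ (fun c hc => isspace_of_notBr c (hdomL c hc) (hLnb c hc))
      have hcondiff : (PySem.Chars.startswith
            (PySem.Chars.upper (PySem.Chars.strip ((c0 :: r0).takeWhile pvNotBr))) ['H','T','T','P','/'] = true)
          ↔ ((((c0 :: r0).dropWhile bIsST).take 5).map PySem.Chars.upperChar = ['H','T','T','P','/']) := by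
        rw [hws, take5_append_iff _ _ hR0, PySem.Chars.strip, hlst,
          show ∀ z, PySem.Chars.upper z = z.map PySem.Chars.upperChar from fun _ => rfl,
          PySem.Chars.startswith_iff]
        exact prefix5_iff _ (fun c hc => ⟨hdomL c (hyL c hc), hLnb c (hyL c hc)⟩)
      rw [linesSpec_cons]
      by_cases hcb : ((((c0 :: r0).dropWhile bIsST).take 5).map PySem.Chars.upperChar = ['H','T','T','P','/'])
      · have hA : PySem.Chars.startswith
            (PySem.Chars.upper (PySem.Chars.strip ((c0 :: r0).takeWhile pvNotBr))) ['H','T','T','P','/'] = true :=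
          hcondiff.mpr hcb
        rw [bScan]
        simp only [httpStatusLoop, hA, if_true, if_pos hcb]
        -- second-token stage
        have hcb' : ((((c0 :: r0).takeWhile pvNotBr).dropWhile bIsST).take 5).map PySem.Chars.upperChar
            = ['H','T','T','P','/'] := by
          rw [hws, take5_append_iff _ _ hR0] at hcb
          exact hcb
        have hy_ne : ((c0 :: r0).takeWhile pvNotBr).dropWhile bIsST ≠ [] := by
          intro h
          rw [h] at hcb'
          simp at hcb'
        have he_st : bIsST ((((c0 :: r0).takeWhile pvNotBr).dropWhile bIsST).head hy_ne) = false :=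
          List.head_dropWhile_not bIsST hy_ne
        have he_mem : (((c0 :: r0).takeWhile pvNotBr).dropWhile bIsST).head hy_ne
            ∈ ((c0 :: r0).takeWhile pvNotBr).dropWhile bIsST := List.head_mem hy_ne
        have he_sp : PySem.Chars.isspace ((((c0 :: r0).takeWhile pvNotBr).dropWhile bIsST).head hy_ne) = false := by
          rw [isspace_of_notBr _ (hdomL _ (hyL _ he_mem)) (hLnb _ (hyL _ he_mem))]
          exact he_st
        obtain ⟨w, hyw, hwsp⟩ := rstrip_decomp (((c0 :: r0).takeWhile pvNotBr).dropWhile bIsST)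
        have hwordsy : words (((c0 :: r0).takeWhile pvNotBr).dropWhile bIsST)
            = words (PySem.Chars.rstrip (((c0 :: r0).takeWhile pvNotBr).dropWhile bIsST)) := by
          conv_lhs => rw [hyw]
          exact words_append_ws _ _ _ le_rfl hwsp
        have hparts : PySem.Chars.split₀ (PySem.Chars.strip ((c0 :: r0).takeWhile pvNotBr))
            = ((((c0 :: r0).takeWhile pvNotBr).dropWhile bIsST).takeWhile pvNotSp)
              :: words ((((c0 :: r0).takeWhile pvNotBr).dropWhile bIsST).dropWhile pvNotSp) := by
          rw [PySem.Chars.strip, hlst, split0_eq_words, ← hwordsy, words_eq_token _ hy_ne he_sp]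
        -- the scanned token equals the second word
        have huL : ∀ c ∈ (((c0 :: r0).takeWhile pvNotBr).dropWhile bIsST).dropWhile pvNotSp,
            c ∈ (c0 :: r0).takeWhile pvNotBr :=
          fun c hc => hyL c ((List.dropWhile_sublist _).subset hc)
        have hu'L : ∀ c ∈ ((((c0 :: r0).takeWhile pvNotBr).dropWhile bIsST).dropWhile pvNotSp).dropWhile PySem.Chars.isspace,
            c ∈ (c0 :: r0).takeWhile pvNotBr :=
          fun c hc => huL c ((List.dropWhile_sublist _).subset hc)
        have hsepL : ∀ c ∈ (c0 :: r0).takeWhile pvNotBr, (!bIsSep c) = pvNotSp c := by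
          intro c hc
          rw [pvNotSp, sep_eq_isspace c (hdomL c hc) (hLnb c hc)]
        have hstL : ∀ c ∈ (c0 :: r0).takeWhile pvNotBr, bIsST c = PySem.Chars.isspace c := by
          intro c hc
          rw [isspace_of_notBr c (hdomL c hc) (hLnb c hc)]
        have htok : List.takeWhile (fun x => !bIsSep x)
              (List.dropWhile bIsST (List.dropWhile (fun x => !bIsSep x) (List.dropWhile bIsST (c0 :: r0))))
            = ((((((c0 :: r0).takeWhile pvNotBr).dropWhile bIsST).dropWhile pvNotSp).dropWhile PySem.Chars.isspace).takeWhile pvNotSp) := by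
          rw [hws,
            dropWhile_append_stop _ _ _ (fun c hc => br_not_sep_false c (hR0 c hc)),
            dropWhile_congr' _ (fun c hc => hsepL c (hyL c hc)),
            dropWhile_append_stop _ _ _ (fun c hc => br_not_st c (hR0 c hc)),
            dropWhile_congr' _ (fun c hc => hstL c (huL c hc)),
            takeWhile_append_stop _ _ _ (fun c hc => br_not_sep_false c (hR0 c hc)),
            takeWhile_congr' _ (fun c hc => hsepL c (hu'L c hc))]
        by_cases hu' : ((((c0 :: r0).takeWhile pvNotBr).dropWhile bIsST).dropWhile pvNotSp).dropWhile PySem.Chars.isspace = []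
        · -- only one token on this line: both sides move to the next line
          have hwu : words ((((c0 :: r0).takeWhile pvNotBr).dropWhile bIsST).dropWhile pvNotSp) = [] := by
            rw [words_unfold, if_pos hu']
          rw [if_neg (by rw [hparts, hwu]; simp)]
          rw [if_pos (by rw [htok, hu']; simp)]
          exact hrec
        · -- a second token exists: both sides return it
          have hwu : words ((((c0 :: r0).takeWhile pvNotBr).dropWhile bIsST).dropWhile pvNotSp)
              = (((((c0 :: r0).takeWhile pvNotBr).dropWhile bIsST).dropWhile pvNotSp).dropWhile PySem.Chars.isspace).takeWhile pvNotSp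
                :: words ((((((c0 :: r0).takeWhile pvNotBr).dropWhile bIsST).dropWhile pvNotSp).dropWhile PySem.Chars.isspace).dropWhile pvNotSp) := by
            rw [words_unfold, if_neg hu']
          have ht2ne : (((((c0 :: r0).takeWhile pvNotBr).dropWhile bIsST).dropWhile pvNotSp).dropWhile PySem.Chars.isspace).takeWhile pvNotSp ≠ [] :=
            takeWhile_notSp_dropWhile_ne _ hu'
          rw [if_pos (by rw [hparts, hwu]; simp)]
          rw [if_neg (by rw [htok]; simpa using ht2ne)]
          rw [hparts, hwu, pyGetD_one_cons, htok]
      · have hA : PySem.Chars.startswith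
            (PySem.Chars.upper (PySem.Chars.strip ((c0 :: r0).takeWhile pvNotBr))) ['H','T','T','P','/'] = false := by
          rw [← Bool.not_eq_true]
          intro h
          exact hcb (hcondiff.mp h)
        rw [bScan]
        simp only [httpStatusLoop, hA, Bool.false_eq_true, if_false, if_neg hcb]
        exact hrec

-- ===== VERDICT (by name: the statement is the Claim_ definition above) =====
theorem http_status_py_spec : Claim_equal_http_status_py := by
  intro output hdom
  unfold Spec_http_status_py http_status_py http_status_py_alt
  have hdom' : ∀ c ∈ output.toList, pvDomChar c = true := by
    simpa [Dom_http_status_py, pvDomStr, List.all_eq_true] using hdom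
  rw [splitlines_eq _ hdom', core output.toList.length _ le_rfl hdom']
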